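-- pv_equiv track=rewrite | github.com/cirosantilli/project-euler-solvers | solvers/424.py | split_tokens
-- ===== SOURCE A (Python) =====
-- def split_tokens(line: str) -> list[str]:
--     """Split comma-separated tokens, but ignore commas inside parentheses."""
--     out: list[str] = []
--     cur: list[str] = []
--     depth = 0
--     for ch in line.strip():
--         if ch == "," and depth == 0:
--             out.append("".join(cur))
--             cur.clear()
--             continue
--         if ch == "(":
--             depth += 1
--         elif ch == ")":
--             depth -= 1
--         cur.append(ch)
--     out.append("".join(cur))
--     return out
-- ===== SOURCE B (Python) =====
-- def split_tokens(line: str) -> list[str]: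
--     """Split comma-separated tokens, but ignore commas inside parentheses."""
--     s = line.strip()
--     cuts = []
--     depth = 0
--     for i, ch in enumerate(s):
--         if ch == "(":
--             depth += 1
--         elif ch == ")":
--             depth -= 1
--         elif ch == "," and depth == 0:
--             cuts.append(i)
--     bounds = [-1] + cuts + [len(s)]
--     return [s[a + 1 : b] for a, b in zip(bounds, bounds[1:])]
-- ===== Notes on version B (the rewrite author's own statement) =====
-- stated objective: alternative
-- what changed: Replaces A's single pass that accumulates characters of the current token with a two-pass scheme: first collect the indices of top-level commas (depth bookkeeping only), then slice the stripped string between consecutive cut points.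
import Mathlib
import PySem

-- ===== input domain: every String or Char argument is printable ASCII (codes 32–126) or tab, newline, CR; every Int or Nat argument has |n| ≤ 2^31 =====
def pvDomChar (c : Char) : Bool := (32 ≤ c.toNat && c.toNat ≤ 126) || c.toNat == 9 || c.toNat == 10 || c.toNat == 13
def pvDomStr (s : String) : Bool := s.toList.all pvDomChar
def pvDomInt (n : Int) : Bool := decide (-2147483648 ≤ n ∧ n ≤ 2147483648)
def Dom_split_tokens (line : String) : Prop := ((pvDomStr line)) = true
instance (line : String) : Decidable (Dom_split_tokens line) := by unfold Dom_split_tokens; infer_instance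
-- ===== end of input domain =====

-- B replaces A's single accumulate-the-current-token pass with a two-pass scheme
-- (collect top-level comma indices, then slice between consecutive cut points);
-- objective: alternative decomposition, same cost.

-- ===== PORT A =====
-- one loop step of A: state is (out, cur, depth)
def stepA (st : List String × List Char × Int) (ch : Char) : List String × List Char × Int :=
  if ch = ',' ∧ st.2.2 = 0 then (st.1 ++ [String.ofList st.2.1], [], st.2.2)
  else
    (st.1, st.2.1 ++ [ch],
      if ch = '(' then st.2.2 + 1 else if ch = ')' then st.2.2 - 1 else st.2.2)

def split_tokens (line : String) : List String :=
  let fin := (PySem.Str.strip line).toList.foldl stepA ([], [], 0)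
  fin.1 ++ [String.ofList fin.2.1]

-- ===== PORT B =====
-- one loop step of B's first pass: state is (depth, cuts)
def stepB (st : Int × List Int) (p : Int × Char) : Int × List Int :=
  if p.2 = '(' then (st.1 + 1, st.2)
  else if p.2 = ')' then (st.1 - 1, st.2)
  else if p.2 = ',' ∧ st.1 = 0 then (st.1, st.2 ++ [p.1])
  else st

def split_tokens_alt (line : String) : List String :=
  let cs := (PySem.Str.strip line).toList
  let fin := (PySem.List.enumerate cs).foldl stepB ((0 : Int), ([] : List Int))
  let bounds := [(-1 : Int)] ++ fin.2 ++ [(cs.length : Int)]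
  (bounds.zip (bounds.drop 1)).map
    (fun p => String.ofList (PySem.List.slice cs (some (p.1 + 1)) (some p.2)))

-- ===== PRECONDITION & SPEC =====
def Spec_split_tokens (line : String) (out : List String) : Prop := out = split_tokens_alt line
instance (line : String) (out : List String) : Decidable (Spec_split_tokens line out) := by unfold Spec_split_tokens; infer_instance

-- ===== CLAIM (what is proved, stated in full; the proofs are below) =====
def Claim_equal_split_tokens : Prop := ∀ (line : String), Dom_split_tokens line → Spec_split_tokens line (split_tokens line)

-- ===== LEMMAS AND PROOFS =====

-- depth update common to both programs
def nd (c : Char) (d : Int) : Int :=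
  if c = '(' then d + 1 else if c = ')' then d - 1 else d

-- apply f to the head segment only
def mapHd (f : List Char → List Char) : List (List Char) → List (List Char)
  | [] => []
  | t :: ts => f t :: ts

-- reference splitter: the common meaning of both programs
def splitRec : List Char → Int → List (List Char)
  | [], _ => [[]]
  | c :: cs, d =>
    if c = ',' ∧ d = 0 then [] :: splitRec cs d
    else mapHd (fun t => c :: t) (splitRec cs (nd c d))

-- relative positions of the top-level commas
def cutsN : List Char → Int → List Nat
  | [], _ => []
  | c :: cs, d =>
    if c = ',' ∧ d = 0 then 0 :: (cutsN cs (nd c d)).map (· + 1)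
    else (cutsN cs (nd c d)).map (· + 1)

-- the slices between consecutive bounds
def segs (cs : List Char) (bs : List Int) : List (List Char) :=
  (bs.zip (bs.drop 1)).map (fun p => PySem.List.slice cs (some (p.1 + 1)) (some p.2))

lemma mapHd_mapHd (f g : List Char → List Char) (xs : List (List Char)) :
    mapHd f (mapHd g xs) = mapHd (fun t => f (g t)) xs := by
  cases xs <;> simp [mapHd]

lemma mapHd_nil_append (xs : List (List Char)) :
    mapHd (fun t => [] ++ t) xs = xs := by
  cases xs <;> simp [mapHd]

lemma Aloop : ∀ (cs : List Char) (out : List String) (cur : List Char) (d : Int),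
    (cs.foldl stepA (out, cur, d)).1 ++ [String.ofList (cs.foldl stepA (out, cur, d)).2.1]
      = out ++ (mapHd (fun t => cur ++ t) (splitRec cs d)).map String.ofList := by
  intro cs
  induction cs with
  | nil => intro out cur d; simp [splitRec, mapHd]
  | cons c cs ih =>
    intro out cur d
    rw [List.foldl_cons]
    by_cases h : c = ',' ∧ d = 0
    · have hstep : stepA (out, cur, d) c = (out ++ [String.ofList cur], [], d) := by
        simp [stepA, h.1, h.2]
      have hsr : splitRec (c :: cs) d = [] :: splitRec cs d := by
        simp [splitRec, h.1, h.2]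
      rw [hstep, ih, hsr, mapHd_nil_append]
      simp [mapHd, List.append_assoc]
    · have hstep : stepA (out, cur, d) c = (out, cur ++ [c], nd c d) := by
        simp only [stepA, if_neg h]; rfl
      have hsr : splitRec (c :: cs) d = mapHd (fun t => c :: t) (splitRec cs (nd c d)) := by
        simp only [splitRec, if_neg h]
      rw [hstep, ih, hsr, mapHd_mapHd]
      have hfun : (fun t => cur ++ (c :: t)) = (fun t => (cur ++ [c]) ++ t) := by
        funext t; simp
      rw [← hfun]

lemma Bfold : ∀ (cs : List Char) (s d : Int) (acc : List Int),
    ((PySem.List.enumerate cs s).foldl stepB (d, acc)).2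
      = acc ++ (cutsN cs d).map (fun k : Nat => s + (k : Int)) := by
  intro cs
  induction cs with
  | nil => intro s d acc; simp [PySem.List.enumerate_nil, cutsN]
  | cons c cs ih =>
    intro s d acc
    rw [PySem.List.enumerate_cons, List.foldl_cons]
    by_cases hp : c = '('
    · have hstep : stepB (d, acc) (s, c) = (d + 1, acc) := by simp [stepB, hp]
      have hcuts : cutsN (c :: cs) d = (cutsN cs (d + 1)).map (· + 1) := by
        simp only [cutsN]
        rw [if_neg (by rw [hp]; simp), show nd c d = d + 1 from by simp [nd, hp]]
      rw [hstep, ih, hcuts]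
      congr 1
      rw [List.map_map]
      apply List.map_congr_left
      intro a _; simp only [Function.comp_apply]; omega
    · by_cases hq : c = ')'
      · have hstep : stepB (d, acc) (s, c) = (d - 1, acc) := by simp [stepB, hq]
        have hcuts : cutsN (c :: cs) d = (cutsN cs (d - 1)).map (· + 1) := by
          simp only [cutsN]
          rw [if_neg (by rw [hq]; simp), show nd c d = d - 1 from by simp [nd, hq]]
        rw [hstep, ih, hcuts]
        congr 1
        rw [List.map_map]
        apply List.map_congr_left
        intro a _; simp only [Function.comp_apply]; omega
      · have hnd : nd c d = d := by simp [nd, hp, hq]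
        by_cases h : c = ',' ∧ d = 0
        · have hstep : stepB (d, acc) (s, c) = (d, acc ++ [s]) := by
            simp [stepB, h.1, h.2]
          have hcuts : cutsN (c :: cs) d = 0 :: (cutsN cs d).map (· + 1) := by
            simp only [cutsN]
            rw [if_pos h, hnd]
          rw [hstep, ih, hcuts]
          simp only [List.map_cons, List.map_map, List.append_assoc, List.singleton_append]
          congr 2
          · omega
          · apply List.map_congr_left
            intro a _; simp only [Function.comp_apply]; omega
        · have hstep : stepB (d, acc) (s, c) = (d, acc) := by
            simp [stepB, hp, hq, h]
          have hcuts : cutsN (c :: cs) d = (cutsN cs d).map (· + 1) := by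
            simp only [cutsN]
            rw [if_neg h, hnd]
          rw [hstep, ih, hcuts]
          congr 1
          rw [List.map_map]
          apply List.map_congr_left
          intro a _; simp only [Function.comp_apply]; omega

lemma slice_shift (cs : List Char) (c : Char) (a b : Int) (ha : 0 ≤ a) (hb : 0 ≤ b) :
    PySem.List.slice (c :: cs) (some (a + 1)) (some (b + 1)) = PySem.List.slice cs (some a) (some b) := by
  rw [PySem.List.slice_toNat _ (by omega) (by omega), PySem.List.slice_toNat _ ha hb]
  have h1 : (a + 1).toNat = a.toNat + 1 := by omega
  rw [h1]
  have h2 : (b + 1).toNat - (a.toNat + 1) = b.toNat - a.toNat := by omega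
  rw [h2, List.drop_succ_cons]

lemma slice_cons_zero (cs : List Char) (c : Char) (b : Int) (hb : 0 ≤ b) :
    PySem.List.slice (c :: cs) (some 0) (some (b + 1)) = c :: PySem.List.slice cs (some 0) (some b) := by
  rw [PySem.List.slice_toNat _ (by omega) (by omega), PySem.List.slice_toNat _ (by omega) hb]
  have h1 : (b + 1).toNat = b.toNat + 1 := by omega
  simp [h1]

lemma segs_shift : ∀ (bs : List Int) (c : Char) (cs : List Char),
    (∀ b ∈ bs, (-1 : Int) ≤ b) → (∀ b ∈ bs.tail, (0 : Int) ≤ b) →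
    segs (c :: cs) (bs.map (· + 1)) = segs cs bs := by
  intro bs
  induction bs with
  | nil => intro c cs _ _; simp [segs]
  | cons b1 rest ih =>
    intro c cs h0 h1
    cases rest with
    | nil => simp [segs]
    | cons b2 rest' =>
      have hb1 : (-1 : Int) ≤ b1 := h0 b1 (by simp)
      have hb2 : (0 : Int) ≤ b2 := h1 b2 (by simp)
      have htail := ih c cs (fun b hb => h0 b (List.mem_cons_of_mem _ hb))
        (fun b hb => h1 b (List.mem_cons_of_mem _ hb))
      simp only [segs, List.map_cons, List.drop_one, List.tail_cons, List.zip_cons_cons,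
        List.map_cons] at htail ⊢
      rw [show b1 + 1 + 1 = (b1 + 1) + 1 from by ring,
        slice_shift cs c (b1 + 1) b2 (by omega) hb2, htail]

lemma cutsN_nonneg_cast (cs : List Char) (d : Int) :
    ∀ b ∈ (cutsN cs d).map (fun k : Nat => (k : Int)), (0 : Int) ≤ b := by
  intro b hb
  simp only [List.mem_map] at hb
  obtain ⟨k, _, hk⟩ := hb
  omega

lemma seg_main : ∀ (cs : List Char) (d : Int),
    segs cs ((-1) :: (cutsN cs d).map (fun k : Nat => (k : Int)) ++ [(cs.length : Int)])
      = splitRec cs d := by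
  intro cs
  induction cs with
  | nil =>
    intro d
    simp [segs, cutsN, splitRec, PySem.List.slice_toNat]
  | cons c cs ih =>
    intro d
    have hlen : (((c :: cs).length : Nat) : Int) = (cs.length : Int) + 1 := by
      push_cast [List.length_cons]; ring
    have hmap : ((cutsN cs (nd c d)).map (· + 1)).map (fun k : Nat => (k : Int))
        = ((cutsN cs (nd c d)).map (fun k : Nat => (k : Int))).map (· + 1) := by
      rw [List.map_map, List.map_map]
      apply List.map_congr_left
      intro a _; simp only [Function.comp_apply]; omega
    -- facts about the inner bound list of cs
    have hmem1 : ∀ b ∈ ((cutsN cs (nd c d)).map (fun k : Nat => (k : Int))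
        ++ [(cs.length : Int)]), (0 : Int) ≤ b := by
      intro b hb
      rcases List.mem_append.mp hb with hb | hb
      · exact cutsN_nonneg_cast cs (nd c d) b hb
      · have : b = (cs.length : Int) := by simpa using hb
        omega
    have hmem0 : ∀ b ∈ ((-1 : Int)) :: ((cutsN cs (nd c d)).map (fun k : Nat => (k : Int))
        ++ [(cs.length : Int)]), (-1 : Int) ≤ b := by
      intro b hb
      rcases List.mem_cons.mp hb with rfl | hb
      · omega
      · have := hmem1 b hb; omega
    by_cases h : c = ',' ∧ d = 0
    · have hnd : nd c d = d := by simp [nd, h.1]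
      have hcuts : cutsN (c :: cs) d = 0 :: (cutsN cs d).map (· + 1) := by
        simp only [cutsN]; rw [if_pos h, hnd]
      rw [hcuts]
      -- bounds = -1 :: shift of (-1 :: cuts ++ [len])
      have hbs : ((-1 : Int)) :: ((0 : Nat) :: (cutsN cs d).map (· + 1)).map (fun k : Nat => (k : Int))
            ++ [(((c :: cs).length : Nat) : Int)]
          = (-1 : Int) :: (((-1 : Int) :: ((cutsN cs d).map (fun k : Nat => (k : Int))
              ++ [(cs.length : Int)])).map (· + 1)) := by
        rw [hnd] at hmap
        simp only [List.map_cons, hmap, hlen, List.cons_append, List.map_append, List.map_cons]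
        norm_num
      rw [hbs]
      have hpeel : segs (c :: cs)
            ((-1 : Int) :: (((-1 : Int) :: ((cutsN cs d).map (fun k : Nat => (k : Int))
              ++ [(cs.length : Int)])).map (· + 1)))
          = PySem.List.slice (c :: cs) (some ((-1 : Int) + 1)) (some ((-1 : Int) + 1))
            :: segs (c :: cs) (((-1 : Int) :: ((cutsN cs d).map (fun k : Nat => (k : Int))
              ++ [(cs.length : Int)])).map (· + 1)) := by
        simp [segs]
      rw [hpeel]
      rw [hnd] at hmem0 hmem1
      rw [segs_shift _ c cs (by simpa using hmem0) (by simpa using hmem1)]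
      have hie := ih d
      simp only [List.cons_append] at hie ⊢
      rw [hie]
      have hslice : PySem.List.slice (c :: cs) (some ((-1 : Int) + 1)) (some ((-1 : Int) + 1)) = [] := by
        rw [PySem.List.slice_toNat _ (by omega) (by omega)]; simp
      rw [hslice]
      simp [splitRec, h.1, h.2]
    · have hcuts : cutsN (c :: cs) d = (cutsN cs (nd c d)).map (· + 1) := by
        simp only [cutsN]; rw [if_neg h]
      rw [hcuts]
      -- expose the head f of the inner bound list cuts ++ [len]
      rcases hys : ((cutsN cs (nd c d)).map (fun k : Nat => (k : Int))) ++ [(cs.length : Int)]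
          with _ | ⟨f, rest⟩
      · exact absurd hys (by simp)
      have hf : (0 : Int) ≤ f := hmem1 f (by rw [hys]; simp)
      have hbs : ((-1 : Int)) :: ((cutsN cs (nd c d)).map (· + 1)).map (fun k : Nat => (k : Int))
            ++ [(((c :: cs).length : Nat) : Int)]
          = (-1 : Int) :: ((f :: rest).map (· + 1)) := by
        simp only [List.cons_append, hmap, hlen]
        rw [← hys]
        simp [List.map_append]
      rw [hbs]
      have hpeel : segs (c :: cs) ((-1 : Int) :: ((f :: rest).map (· + 1)))
          = PySem.List.slice (c :: cs) (some ((-1 : Int) + 1)) (some (f + 1))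
            :: segs (c :: cs) ((f :: rest).map (· + 1)) := by
        simp [segs]
      rw [hpeel]
      have h0' : ∀ b ∈ (f :: rest), (-1 : Int) ≤ b := by
        intro b hb
        have : b ∈ ((cutsN cs (nd c d)).map (fun k : Nat => (k : Int))) ++ [(cs.length : Int)] := by
          rw [hys]; exact hb
        have := hmem1 b this; omega
      have h1' : ∀ b ∈ (f :: rest).tail, (0 : Int) ≤ b := by
        intro b hb
        exact hmem1 b (by rw [hys]; exact List.mem_cons_of_mem _ hb)
      rw [segs_shift _ c cs h0' h1']
      have hie := ih (nd c d)
      rw [List.cons_append, hys] at hie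
      have hsegcs : segs cs ((-1 : Int) :: f :: rest)
          = PySem.List.slice cs (some ((-1 : Int) + 1)) (some f) :: segs cs (f :: rest) := by
        simp [segs]
      rw [hsegcs] at hie
      have hsr : splitRec (c :: cs) d = mapHd (fun t => c :: t) (splitRec cs (nd c d)) := by
        simp only [splitRec, if_neg h]
      rw [hsr, ← hie]
      have hhead : PySem.List.slice (c :: cs) (some ((-1 : Int) + 1)) (some (f + 1))
          = c :: PySem.List.slice cs (some ((-1 : Int) + 1)) (some f) := by
        norm_num
        exact slice_cons_zero cs c f hf
      rw [hhead]
      simp [mapHd]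

lemma a_eq (line : String) :
    split_tokens line = (splitRec (PySem.Str.strip line).toList 0).map String.ofList := by
  unfold split_tokens
  dsimp only
  rw [Aloop]
  rw [mapHd_nil_append]
  simp

lemma alt_eq (line : String) :
    split_tokens_alt line = (splitRec (PySem.Str.strip line).toList 0).map String.ofList := by
  unfold split_tokens_alt
  dsimp only
  rw [Bfold]
  have hmap : (cutsN (PySem.Str.strip line).toList 0).map (fun k : Nat => (0 : Int) + (k : Int))
      = (cutsN (PySem.Str.strip line).toList 0).map (fun k : Nat => (k : Int)) := by
    apply List.map_congr_left; intro a _; ring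
  rw [List.nil_append, hmap]
  rw [← seg_main (PySem.Str.strip line).toList 0]
  simp [segs, List.map_map]

-- ===== VERDICT (by name: the statement is the Claim_ definition above) =====
theorem split_tokens_spec : Claim_equal_split_tokens := by
  intro line _
  unfold Spec_split_tokens
  rw [a_eq, alt_eq]
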